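-- pv_equiv track=rewrite | github.com/philmarino/JumpGame2 | main.py | jumpIterator
-- ===== SOURCE A (Python) =====
-- def jumpIterator(list, startingPoint, depth):
--     resultSet = []
--     if startingPoint > len(list):
--         return resultSet
--     if startingPoint == len(list)-1:
--         resultSet.append([startingPoint])
--         return resultSet
--     for index in range(1, list[startingPoint]+1):
--         lower = jumpIterator(list, startingPoint+index, depth+1)
--         for each in lower:
--             additive = [startingPoint]
--             additive.extend(each)
--             resultSet.append(additive)
--
--     return resultSet
-- ===== SOURCE B (Python) =====
-- def jumpIterator(list, startingPoint, depth):
--     n = len(list)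
--     if startingPoint >= n:
--         return []
--     # paths[i] = all jump paths from position i to position n-1, filled bottom-up;
--     # jumps past the last cell contribute nothing, so the range is clamped at n-1-i
--     paths = {}
--     for i in range(n - 1, startingPoint - 1, -1):
--         if i == n - 1:
--             paths[i] = [[i]]
--         else:
--             paths[i] = [[i] + p
--                         for j in range(1, min(list[i], n - 1 - i) + 1)
--                         for p in paths[i + j]]
--     return paths[startingPoint]
-- ===== Notes on version B (the rewrite author's own statement) =====
-- stated objective: alternative
-- what changed: Replaces A's top-down recursion over jump positions with a single bottom-up pass that fills a table of suffix-path lists per position and reads off the entry for startingPoint; each suffix is computed once instead of once per path reaching it.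
import Mathlib
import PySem

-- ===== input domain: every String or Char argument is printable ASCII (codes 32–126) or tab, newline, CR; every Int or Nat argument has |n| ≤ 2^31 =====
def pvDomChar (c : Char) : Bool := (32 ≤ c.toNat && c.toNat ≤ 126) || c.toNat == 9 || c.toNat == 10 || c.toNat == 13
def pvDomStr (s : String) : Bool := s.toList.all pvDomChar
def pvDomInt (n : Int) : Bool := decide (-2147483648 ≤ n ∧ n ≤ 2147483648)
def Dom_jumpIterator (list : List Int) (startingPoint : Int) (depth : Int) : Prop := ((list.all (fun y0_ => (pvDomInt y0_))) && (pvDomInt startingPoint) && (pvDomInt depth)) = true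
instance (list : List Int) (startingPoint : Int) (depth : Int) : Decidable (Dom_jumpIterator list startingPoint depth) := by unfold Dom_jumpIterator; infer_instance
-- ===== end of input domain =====

-- B enumerates the same jump paths by a bottom-up table of suffix-path lists
-- (each position's path list computed once) instead of A's top-down recursion
-- that recomputes whole subtrees; same return value wherever A returns.

-- ===== PORT A =====
-- list[startingPoint] is ported with pyGetD (default 0): Python raises IndexError
-- exactly where pyGet? is none, and Pre_ excludes the inputs on which such a
-- position is actually reached.
def jumpIterator (list : List Int) (startingPoint : Int) (depth : Int) : List (List Int) :=
  if (list.length : Int) < startingPoint then []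
  else if startingPoint = (list.length : Int) - 1 then [[startingPoint]]
  else
    (PySem.List.pyRange 1 ((PySem.List.pyGetD list startingPoint 0) + 1) 1).attach.foldl
      (fun resultSet index =>
        resultSet ++ (jumpIterator list (startingPoint + index.1) (depth + 1)).map
          (fun each => startingPoint :: each)) []
  termination_by ((list.length : Int) + 1 - startingPoint).toNat
  decreasing_by
    have h1 : 1 ≤ index.1 := (PySem.List.mem_pyRange_one.mp index.2).1
    omega

-- ===== PORT B =====
-- loop body of B's table-filling pass (one position i); the jump range is clamped
-- at the last cell, as in Source B
def altStep (list : List Int) (paths : PySem.Dict Int (List (List Int))) (i : Int) :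
    PySem.Dict Int (List (List Int)) :=
  if i = (list.length : Int) - 1 then paths.insert i [[i]]
  else paths.insert i
    ((PySem.List.pyRange 1 (min (PySem.List.pyGetD list i 0) ((list.length : Int) - 1 - i) + 1) 1).flatMap
      (fun j => (paths.getD (i + j) []).map (fun p => i :: p)))

def jumpIterator_alt (list : List Int) (startingPoint : Int) (depth : Int) : List (List Int) :=
  if (list.length : Int) ≤ startingPoint then []
  else
    ((PySem.List.pyRange ((list.length : Int) - 1) (startingPoint - 1) (-1)).foldl
      (altStep list) PySem.Dict.empty).getD startingPoint []

-- ===== PRECONDITION & SPEC =====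
-- pvReach computes the set of positions the jump process starting at startingPoint can
-- reach (successors clamped at len, beyond which no position is ever indexed): one
-- forward closure pass over the positions, in increasing order.
def pvReachStep (list : List Int) (S : List Int) (p : Int) : List Int :=
  if p ∈ S then
    match PySem.List.pyGet? list p with
    | some v => S ++ PySem.List.pyRange (p + 1) (min (p + v) (list.length : Int) + 1) 1
    | none => S
  else S

-- the scan starts at max startingPoint (-len): positions below -len cannot be indexed
-- and never expand, so the reach set is the same and membership stays cheap to decide
def pvReach (list : List Int) (startingPoint : Int) : List Int :=
  (PySem.List.pyRange (max startingPoint (-(list.length : Int))) ((list.length : Int) - 1) 1).foldl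
    (pvReachStep list) [startingPoint]

-- Pre_ excludes exactly the inputs on which A raises IndexError: those where the jump
-- process starting at startingPoint reaches a position it would index (not past the end,
-- not the terminal cell) whose index is out of range (= len, or < -len).
def Pre_jumpIterator (list : List Int) (startingPoint : Int) (depth : Int) : Prop :=
  ∀ p ∈ pvReach list startingPoint,
    ¬(p ≤ (list.length : Int) ∧ p ≠ (list.length : Int) - 1 ∧ PySem.List.pyGet? list p = none)
instance (list : List Int) (startingPoint : Int) (depth : Int) : Decidable (Pre_jumpIterator list startingPoint depth) := by unfold Pre_jumpIterator; infer_instance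

def pvWitness_jumpIterator : List Int × Int × Int := ([1, 2, 1, 1], 0, 0)

def Spec_jumpIterator (list : List Int) (startingPoint : Int) (depth : Int) (out : List (List Int)) : Prop := out = jumpIterator_alt list startingPoint depth
instance (list : List Int) (startingPoint : Int) (depth : Int) (out : List (List Int)) : Decidable (Spec_jumpIterator list startingPoint depth out) := by unfold Spec_jumpIterator; infer_instance

-- ===== CLAIM (what is proved, stated in full; the proofs are below) =====
def Claim_equal_jumpIterator : Prop := ∀ (list : List Int) (startingPoint : Int) (depth : Int), Dom_jumpIterator list startingPoint depth → Pre_jumpIterator list startingPoint depth → Spec_jumpIterator list startingPoint depth (jumpIterator list startingPoint depth)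

-- ===== LEMMAS AND PROOFS =====

-- "the jump process never reaches a raising position from p", recursively
def pvSafe (list : List Int) (p : Int) : Prop :=
  if (list.length : Int) < p ∨ p = (list.length : Int) - 1 then True
  else match PySem.List.pyGet? list p with
    | none => False
    | some v => ∀ j, 1 ≤ j → j ≤ v → pvSafe list (p + j)
  termination_by ((list.length : Int) + 1 - p).toNat
  decreasing_by omega

theorem mem_reachStep (list : List Int) (S : List Int) (p x : Int) (hx : x ∈ S) :
    x ∈ pvReachStep list S p := by
  unfold pvReachStep
  split
  · split
    · exact List.mem_append_left _ hx
    · exact hx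
  · exact hx

theorem mem_reachFold (list : List Int) (l S : List Int) (x : Int) (hx : x ∈ S) :
    x ∈ l.foldl (pvReachStep list) S := by
  induction l generalizing S with
  | nil => exact hx
  | cons a t ih => exact ih _ (mem_reachStep list S a x hx)

theorem reachStep_sub (list : List Int) (S : List Int) (p x : Int)
    (hx : x ∈ pvReachStep list S p) : x ∈ S ∨ p < x := by
  unfold pvReachStep at hx
  split at hx
  · split at hx
    · rcases List.mem_append.mp hx with h | h
      · exact Or.inl h
      · have := (PySem.List.mem_pyRange_one.mp h).1
        exact Or.inr (by omega)
    · exact Or.inl hx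
  · exact Or.inl hx

theorem reachFold_sub (list : List Int) (l S : List Int) (x : Int)
    (hx : x ∈ l.foldl (pvReachStep list) S) : x ∈ S ∨ ∃ p ∈ l, p < x := by
  induction l generalizing S with
  | nil => exact Or.inl hx
  | cons a t ih =>
    rcases ih _ hx with h | ⟨p, hp, hlt⟩
    · rcases reachStep_sub list S a x h with h' | h'
      · exact Or.inl h'
      · exact Or.inr ⟨a, List.mem_cons_self, h'⟩
    · exact Or.inr ⟨p, List.mem_cons_of_mem _ hp, hlt⟩

-- the reach set is closed under jump successors of its processed members
theorem reachFold_closed (list : List Int) (l : List Int) :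
    ∀ S : List Int, l.Pairwise (· < ·) →
      ∀ p v, p ∈ l → p ∈ l.foldl (pvReachStep list) S →
        PySem.List.pyGet? list p = some v →
        ∀ q, p + 1 ≤ q → q ≤ min (p + v) (list.length : Int) →
          q ∈ l.foldl (pvReachStep list) S := by
  induction l with
  | nil => intro S _ p v hp; exact absurd hp (List.not_mem_nil)
  | cons a t ih =>
    intro S hpw p v hp hpF hg q hq1 hq2
    have ha := (List.pairwise_cons.mp hpw).1
    have hta := (List.pairwise_cons.mp hpw).2
    rcases List.mem_cons.mp hp with rfl | hpt
    · -- p = a: a must be in S already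
      have haS : p ∈ S := by
        by_contra hnS
        have hstep : pvReachStep list S p = S := by unfold pvReachStep; rw [if_neg hnS]
        rw [List.foldl_cons, hstep] at hpF
        rcases reachFold_sub list t S p hpF with h | ⟨p0, hp0, hlt⟩
        · exact hnS h
        · exact absurd hlt (by have := ha p0 hp0; omega)
      have hstep : pvReachStep list S p
          = S ++ PySem.List.pyRange (p + 1) (min (p + v) (list.length : Int) + 1) 1 := by
        unfold pvReachStep; rw [if_pos haS, hg]
      rw [List.foldl_cons, hstep]
      apply mem_reachFold
      exact List.mem_append_right _ (PySem.List.mem_pyRange_one.mpr ⟨hq1, by omega⟩)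
    · rw [List.foldl_cons] at hpF ⊢
      exact ih _ hta p v hpt hpF hg q hq1 hq2

theorem reach_lb (list : List Int) (sp p : Int) (hp : p ∈ pvReach list sp) : sp ≤ p := by
  rcases reachFold_sub list _ [sp] p hp with h | ⟨p0, hp0, hlt⟩
  · simp at h; omega
  · have := (PySem.List.mem_pyRange_one.mp hp0).1; omega

theorem sp_mem_reach (list : List Int) (sp : Int) : sp ∈ pvReach list sp :=
  mem_reachFold list _ [sp] sp (List.mem_singleton.mpr rfl)

theorem safe_of_pre (list : List Int) (sp : Int)
    (hpre : ∀ p ∈ pvReach list sp,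
      ¬(p ≤ (list.length : Int) ∧ p ≠ (list.length : Int) - 1 ∧ PySem.List.pyGet? list p = none)) :
    ∀ p ∈ pvReach list sp, pvSafe list p := by
  have key : ∀ k : Nat, ∀ p : Int, ((list.length : Int) + 1 - p).toNat < k →
      p ∈ pvReach list sp → pvSafe list p := by
    intro k
    induction k with
    | zero => intro p h; omega
    | succ k ih =>
      intro p hm hp
      rw [pvSafe]
      by_cases h1 : (list.length : Int) < p ∨ p = (list.length : Int) - 1
      · rw [if_pos h1]; trivial
      · rw [if_neg h1]
        push Not at h1
        cases hg : PySem.List.pyGet? list p with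
        | none => exact absurd ⟨by omega, h1.2, hg⟩ (hpre p hp)
        | some v =>
          intro j hj1 hjv
          by_cases h2 : (list.length : Int) < p + j
          · rw [pvSafe, if_pos (Or.inl h2)]; trivial
          · have hin : -((list.length : Int)) ≤ p := by
              by_contra hC
              have hnone : PySem.List.pyGet? list p = none := by
                rw [PySem.List.pyGet?_eq_none_iff]; unfold PySem.Raise.InRange; omega
              simp [hnone] at hg
            have hlb := reach_lb list sp p hp
            have hq : p + j ∈ pvReach list sp := by
              apply reachFold_closed list _ [sp] (PySem.List.pairwise_lt_pyRange_one _ _) p v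
                (PySem.List.mem_pyRange_one.mpr ⟨by omega, by omega⟩) hp hg
                (p + j) (by omega) (by omega)
            exact ih (p + j) (by omega) hq
  intro p hp
  exact key (((list.length : Int) + 1 - p).toNat + 1) p (by omega) hp

theorem pyGet?_none_of_len_le (xs : List Int) (n : Int) (h : (xs.length : Int) ≤ n) :
    PySem.List.pyGet? xs n = none := by
  rw [PySem.List.pyGet?_eq_none_iff]; unfold PySem.Raise.InRange; omega

-- A as a flatMap over the jump range (unfolds the foldl/attach shape of the port).
theorem jumpIterator_eq_flatMap (list : List Int) (sp d : Int)
    (h1 : ¬ (list.length : Int) < sp) (h2 : sp ≠ (list.length : Int) - 1) :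
    jumpIterator list sp d =
      (PySem.List.pyRange 1 ((PySem.List.pyGetD list sp 0) + 1) 1).flatMap
        (fun j => (jumpIterator list (sp + j) (d + 1)).map (fun each => sp :: each)) := by
  rw [jumpIterator]
  rw [if_neg h1, if_neg h2]
  rw [List.foldl_attach (l := PySem.List.pyRange 1 ((PySem.List.pyGetD list sp 0) + 1) 1)
    (f := fun resultSet index =>
      resultSet ++ (jumpIterator list (sp + index) (d + 1)).map (fun each => sp :: each))]
  rw [PySem.List.foldl_append_eq_flatMap]
  simp

-- Invariant of B's table loop: after filling positions m..n-1, every safe entry q in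
-- that range holds exactly A's answer from q (for any depth).
theorem altLoop_inv (list : List Int) (m : Int) :
    ∀ q d, m ≤ q → q < (list.length : Int) → pvSafe list q →
      ((PySem.List.pyRange ((list.length : Int) - 1) (m - 1) (-1)).foldl
        (altStep list) PySem.Dict.empty).getD q [] = jumpIterator list q d := by
  set n : Int := (list.length : Int) with hn
  have key : ∀ k : Nat, ∀ m : Int, (n - m).toNat = k →
      ∀ q d, m ≤ q → q < n → pvSafe list q →
        ((PySem.List.pyRange (n - 1) (m - 1) (-1)).foldl
          (altStep list) PySem.Dict.empty).getD q [] = jumpIterator list q d := by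
    intro k
    induction k with
    | zero => intro m hk q d hq1 hq2 _; omega
    | succ k ih =>
      intro m hk q d hq1 hq2 hsafe
      have hmn : m < n := by omega
      -- split the countdown range: [n-1 … m] = [n-1 … m+1] ++ [m]
      have hsplit : PySem.List.pyRange (n - 1) (m - 1) (-1)
          = PySem.List.pyRange (n - 1) m (-1) ++ [m] := by
        rw [PySem.List.pyRange_neg_one_eq_reverse, PySem.List.pyRange_neg_one_eq_reverse]
        have : PySem.List.pyRange (m - 1 + 1) (n - 1 + 1) 1
            = m :: PySem.List.pyRange (m + 1) (n - 1 + 1) 1 := by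
          have harg : m - 1 + 1 = m := by ring
          rw [harg]
          exact PySem.List.pyRange_one_cons (by omega)
        rw [this]
        simp
      rw [hsplit, List.foldl_append]
      set D := (PySem.List.pyRange (n - 1) m (-1)).foldl (altStep list) PySem.Dict.empty with hD
      have hDinv : ∀ q d, m + 1 ≤ q → q < n → pvSafe list q →
          D.getD q [] = jumpIterator list q d := by
        intro q d hq1' hq2' hs'
        have := ih (m + 1) (by omega) q d hq1' hq2' hs'
        have harg : m + 1 - 1 = m := by ring
        rw [harg] at this
        exact this
      simp only [List.foldl_cons, List.foldl_nil]
      by_cases hq : q = m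
      · subst hq
        by_cases hlast : q = n - 1
        · -- terminal position: entry is [[q]], and A returns [[q]]
          rw [altStep, if_pos hlast, PySem.Dict.getD_insert, if_pos rfl]
          rw [jumpIterator]
          rw [if_neg (by omega), if_pos hlast]
        · -- interior position: entry is the flatMap over the jump range
          rw [altStep, if_neg hlast, PySem.Dict.getD_insert, if_pos rfl]
          rw [jumpIterator_eq_flatMap list q d (by omega) hlast]
          rw [pvSafe, if_neg (by omega : ¬((list.length : Int) < q ∨ q = (list.length : Int) - 1))] at hsafe
          cases hg : PySem.List.pyGet? list q with
          | none => rw [hg] at hsafe; exact absurd hsafe id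
          | some v =>
            rw [hg] at hsafe
            have hval : PySem.List.pyGetD list q 0 = v := by
              simp [PySem.List.pyGetD, hg]
            rw [hval]
            -- a jump landing exactly on n is impossible (pvSafe n is False)
            have hnotn : ∀ j, 1 ≤ j → j ≤ v → q + j ≠ n := by
              intro j hj1 hj2 he
              have hsj := hsafe j hj1 hj2
              rw [he, pvSafe, if_neg (by omega : ¬(n < n ∨ n = n - 1)),
                pyGet?_none_of_len_le list n (by omega)] at hsj
              exact hsj
            -- B's entry at a clamped j equals A's summand
            have hGF : ∀ j, 1 ≤ j → j ≤ min v (n - 1 - q) →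
                (D.getD (q + j) []).map (fun p => q :: p)
                  = (jumpIterator list (q + j) (d + 1)).map (fun each => q :: each) := by
              intro j hj1 hj2
              rw [hDinv (q + j) (d + 1) (by omega) (by omega) (hsafe j hj1 (by omega))]
            by_cases hcase : v ≤ n - 1 - q
            · rw [min_eq_left hcase]
              apply List.flatMap_congr
              intro j hj
              have hb := PySem.List.mem_pyRange_one.mp hj
              exact hGF j hb.1 (by omega)
            · rw [min_eq_right (by omega : n - 1 - q ≤ v)]
              have hsplitA : PySem.List.pyRange 1 (v + 1) 1
                  = PySem.List.pyRange 1 (n - 1 - q + 1) 1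
                      ++ PySem.List.pyRange (n - 1 - q + 1) (v + 1) 1 :=
                PySem.List.pyRange_one_append 1 (n - 1 - q + 1) (v + 1) (by omega) (by omega)
              rw [hsplitA, List.flatMap_append]
              have htail : (PySem.List.pyRange (n - 1 - q + 1) (v + 1) 1).flatMap
                  (fun j => (jumpIterator list (q + j) (d + 1)).map (fun each => q :: each))
                    = [] := by
                rw [List.flatMap_eq_nil_iff]
                intro j hj
                have hb := PySem.List.mem_pyRange_one.mp hj
                have hne := hnotn j (by omega) (by omega)
                rw [jumpIterator, if_pos (by omega : n < q + j)]
                rfl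
              rw [htail, List.append_nil]
              apply List.flatMap_congr
              intro j hj
              have hb := PySem.List.mem_pyRange_one.mp hj
              exact hGF j hb.1 (by omega)
      · -- untouched entries keep their value
        rw [altStep]
        split
        · rw [PySem.Dict.getD_insert, if_neg hq]
          exact hDinv q d (by omega) hq2 hsafe
        · rw [PySem.Dict.getD_insert, if_neg hq]
          exact hDinv q d (by omega) hq2 hsafe
  intro q d hq1 hq2 hs
  exact key (n - m).toNat m rfl q d hq1 hq2 hs

-- ===== VERDICT (by name: the statement is the Claim_ definition above) =====
theorem jumpIterator_spec : Claim_equal_jumpIterator := by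
  intro list sp depth _ hpre
  unfold Pre_jumpIterator at hpre
  unfold Spec_jumpIterator jumpIterator_alt
  have hsp := sp_mem_reach list sp
  by_cases hbig : (list.length : Int) ≤ sp
  · rw [if_pos hbig]
    have hne : sp ≠ (list.length : Int) := by
      intro he
      exact hpre sp hsp ⟨by omega, by omega, pyGet?_none_of_len_le list sp (by omega)⟩
    rw [jumpIterator, if_pos (by omega)]
  · rw [if_neg hbig]
    exact (altLoop_inv list sp sp depth (le_refl sp) (by omega)
      (safe_of_pre list sp hpre sp hsp)).symm
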